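-- pv_equiv track=rewrite | github.com/Valerio1903/Manens_Toolbar | Manens.tab/Revit to Excel.panel/Revit to Excel HVAC.pushbutton/script.py | _chunk_consecutive_rows_din
-- ===== SOURCE A (Python) =====
-- def _chunk_consecutive_rows_din(sorted_rows):
--     runs = []
--     if not sorted_rows: return runs
--     start_r = prev_r = sorted_rows[0]
--     for r in sorted_rows[1:]:
--         if r == prev_r + 1:
--             prev_r = r
--         else:
--             runs.append((start_r, prev_r))
--             start_r = prev_r = r
--     runs.append((start_r, prev_r))
--     return runs
-- ===== SOURCE B (Python) =====
-- def _chunk_consecutive_rows_din(sorted_rows):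
--     # Build the runs back-to-front: walk the list in reverse and either extend
--     # the most recently opened run downward or open a new singleton run; the
--     # runs are collected in reverse order, so reverse once at the end.
--     runs = []
--     for r in reversed(sorted_rows):
--         if runs and runs[-1][0] == r + 1:
--             runs[-1] = (r, runs[-1][1])
--         else:
--             runs.append((r, r))
--     runs.reverse()
--     return runs
-- ===== Notes on version B (the rewrite author's own statement) =====
-- stated objective: alternative
-- what changed: B traverses the list in reverse and builds the runs back-to-front (extending the most recently opened run downward or opening a new singleton, reversing once at the end) instead of A's forward scan with start/prev break-detection state.
import Mathlib
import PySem

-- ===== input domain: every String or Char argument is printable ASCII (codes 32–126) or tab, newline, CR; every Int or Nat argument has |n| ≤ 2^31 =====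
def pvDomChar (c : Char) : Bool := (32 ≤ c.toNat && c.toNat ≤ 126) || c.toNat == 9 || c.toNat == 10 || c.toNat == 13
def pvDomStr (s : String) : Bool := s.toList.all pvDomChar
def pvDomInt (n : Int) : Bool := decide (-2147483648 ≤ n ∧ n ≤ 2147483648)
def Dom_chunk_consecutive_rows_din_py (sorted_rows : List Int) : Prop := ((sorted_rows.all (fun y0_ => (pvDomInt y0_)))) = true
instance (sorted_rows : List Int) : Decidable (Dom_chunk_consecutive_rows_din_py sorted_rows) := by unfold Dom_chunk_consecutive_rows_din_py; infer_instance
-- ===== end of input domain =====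

-- B builds the runs back-to-front with a right fold instead of A's forward scan
-- with start/prev break-detection state; alternative structure, same cost.


-- ===== PORT A =====
def chunk_consecutive_rows_din_py (sorted_rows : List Int) : List (Int × Int) :=
  match sorted_rows with
  | [] => []
  | x :: rest =>
    -- start_r = prev_r = sorted_rows[0]; for r in sorted_rows[1:]: …
    let st := rest.foldl (fun (acc : List (Int × Int) × Int × Int) r =>
        let runs := acc.1
        let start_r := acc.2.1
        let prev_r := acc.2.2
        if r == prev_r + 1 then (runs, start_r, r)
        else (runs ++ [(start_r, prev_r)], r, r)) ([], x, x)
    st.1 ++ [(st.2.1, st.2.2)]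

-- ===== PORT B =====
-- one step of B's reverse loop: extend the front run downward or prepend a singleton
def chunk_alt_step (r : Int) (runs : List (Int × Int)) : List (Int × Int) :=
  match runs with
  | (a, b) :: rest => if a == r + 1 then (r, b) :: rest else (r, r) :: (a, b) :: rest
  | [] => [(r, r)]

-- the loop 'for r in reversed(sorted_rows)' with append-at-the-back: a Lean
-- cons-list accumulator holds Python's `runs` reversed (Python's runs[-1] is the
-- Lean head), so the final `runs.reverse()` is absorbed: the cons list is
-- already in output order and is returned as is.
def chunk_consecutive_rows_din_py_alt (sorted_rows : List Int) : List (Int × Int) :=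
  sorted_rows.reverse.foldl (fun runs r => chunk_alt_step r runs) []

-- ===== PRECONDITION & SPEC =====
def Spec_chunk_consecutive_rows_din_py (sorted_rows : List Int) (out : List (Int × Int)) : Prop := out = chunk_consecutive_rows_din_py_alt sorted_rows
instance (sorted_rows : List Int) (out : List (Int × Int)) : Decidable (Spec_chunk_consecutive_rows_din_py sorted_rows out) := by unfold Spec_chunk_consecutive_rows_din_py; infer_instance

-- ===== CLAIM (what is proved, stated in full; the proofs are below) =====
def Claim_equal_chunk_consecutive_rows_din_py : Prop := ∀ (sorted_rows : List Int), Dom_chunk_consecutive_rows_din_py sorted_rows → Spec_chunk_consecutive_rows_din_py sorted_rows (chunk_consecutive_rows_din_py sorted_rows)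

-- ===== LEMMAS AND PROOFS =====

-- A's loop as structural recursion on the remaining list, with state (start_r, prev_r)
def fA (s p : Int) (xs : List Int) : List (Int × Int) :=
  match xs with
  | [] => [(s, p)]
  | r :: rs => if r = p + 1 then fA s r rs else (s, p) :: fA r r rs

lemma foldl_eq_fA (xs : List Int) : ∀ (runs : List (Int × Int)) (s p : Int),
    (let st := xs.foldl (fun (acc : List (Int × Int) × Int × Int) r =>
        if r == acc.2.2 + 1 then (acc.1, acc.2.1, r)
        else (acc.1 ++ [(acc.2.1, acc.2.2)], r, r)) (runs, s, p)
     st.1 ++ [(st.2.1, st.2.2)]) = runs ++ fA s p xs := by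
  induction xs with
  | nil => intro runs s p; simp [fA]
  | cons r rs ih =>
    intro runs s p
    simp only [List.foldl_cons, fA]
    by_cases h : r = p + 1
    · simp only [beq_iff_eq, h]
      simpa using ih runs s (p + 1)
    · simp only [beq_iff_eq, if_neg h]
      simpa [List.append_assoc] using ih (runs ++ [(s, p)]) r r

-- the head of fA s p xs starts with s, and the rest is independent of s
lemma fA_head (xs : List Int) : ∀ (p : Int), ∃ b rest,
    ∀ s : Int, fA s p xs = (s, b) :: rest := by
  induction xs with
  | nil => intro p; exact ⟨p, [], fun s => rfl⟩
  | cons r rs ih =>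
    intro p
    by_cases h : r = p + 1
    · obtain ⟨b, rest, hb⟩ := ih r
      refine ⟨b, rest, fun s => ?_⟩
      simp only [fA, if_pos h]
      exact hb s
    · exact ⟨p, fA r r rs, fun s => by simp [fA, h]⟩

lemma alt_eq_foldr (xs : List Int) :
    chunk_consecutive_rows_din_py_alt xs = List.foldr chunk_alt_step [] xs := by
  simp [chunk_consecutive_rows_din_py_alt, List.foldl_reverse]

lemma foldr_eq_fA (xs : List Int) : ∀ (x : Int),
    List.foldr chunk_alt_step [] (x :: xs) = fA x x xs := by
  induction xs with
  | nil => intro x; rfl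
  | cons r rs ih =>
    intro x
    have : List.foldr chunk_alt_step [] (x :: r :: rs)
        = chunk_alt_step x (fA r r rs) := by
      simp only [List.foldr_cons]
      rw [← List.foldr_cons (f := chunk_alt_step), ih r]
    rw [this]
    obtain ⟨b, rest, hb⟩ := fA_head rs r
    by_cases h : r = x + 1
    · -- extend the run: fA x x (r :: rs) = fA x r rs = (x,b)::rest
      rw [show fA x x (r :: rs) = fA x r rs from by simp [fA, h]]
      rw [hb r, hb x]
      simp [chunk_alt_step, h]
    · simp only [fA, if_neg h, hb r, chunk_alt_step]
      simp [h]

-- ===== VERDICT (by name: the statement is the Claim_ definition above) =====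
theorem chunk_consecutive_rows_din_py_spec : Claim_equal_chunk_consecutive_rows_din_py := by
  intro sorted_rows _
  unfold Spec_chunk_consecutive_rows_din_py chunk_consecutive_rows_din_py
  rw [alt_eq_foldr]
  match sorted_rows with
  | [] => rfl
  | x :: rest =>
    simp only []
    rw [foldr_eq_fA rest x]
    simpa using foldl_eq_fA rest [] x x
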